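-- pv_equiv track=rewrite | github.com/openclaw/openclaw | workspace/agents/war-room/shelter/core/evolution.py | unsolicited_followup_count
-- ===== SOURCE A (Python) =====
-- def unsolicited_followup_count(conversation: dict) -> int:
--     """守夜人在使用者沒說話時主動追問了幾次？"""
--     messages = conversation.get("messages", [])
--     count = 0
--     for i in range(1, len(messages)):
--         if (messages[i].get("role") == "assistant"
--                 and messages[i - 1].get("role") == "assistant"):
--             count += 1
--     return count
-- ===== SOURCE B (Python) =====
-- def unsolicited_followup_count(conversation: dict) -> int:
--     """Sum of (run_length - 1) over maximal runs of consecutive assistant messages."""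
--     total = 0
--     run = 0
--     for m in conversation.get("messages", []):
--         if m.get("role") == "assistant":
--             run += 1
--         else:
--             total += max(run - 1, 0)
--             run = 0
--     return total + max(run - 1, 0)
-- ===== Notes on version B (the rewrite author's own statement) =====
-- stated objective: alternative
-- what changed: B replaces the index-pair scan (checking messages[i] and messages[i-1] for each i) with a single direct pass that tracks the length of the current run of assistant messages and adds run_length-1 per maximal run.
import Mathlib
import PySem

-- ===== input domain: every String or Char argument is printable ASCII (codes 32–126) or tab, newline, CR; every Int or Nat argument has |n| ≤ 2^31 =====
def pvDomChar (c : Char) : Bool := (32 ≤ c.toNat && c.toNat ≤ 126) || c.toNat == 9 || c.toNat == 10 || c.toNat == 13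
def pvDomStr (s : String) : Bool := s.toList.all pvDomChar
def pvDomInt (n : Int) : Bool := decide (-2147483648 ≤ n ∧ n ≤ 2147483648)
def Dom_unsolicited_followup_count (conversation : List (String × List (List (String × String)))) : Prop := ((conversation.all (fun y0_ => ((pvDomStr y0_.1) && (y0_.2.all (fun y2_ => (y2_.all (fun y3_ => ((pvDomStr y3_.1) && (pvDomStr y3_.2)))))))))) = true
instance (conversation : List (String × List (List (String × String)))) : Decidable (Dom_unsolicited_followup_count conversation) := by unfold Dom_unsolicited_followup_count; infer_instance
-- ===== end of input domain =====

-- B replaces A's index-pair scan with a single run-length pass (sum of run_length-1 over assistant runs); alternative decomposition, same cost.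

-- ===== PORT A =====
-- messages[i].get("role") == "assistant"  (Option String equality, exact for Python's None/str compare)
def pvIsAssistant (m : List (String × String)) : Bool :=
  (PySem.Dict.get? (PySem.Dict.mk m) "role") == some "assistant"

def unsolicited_followup_count (conversation : List (String × List (List (String × String)))) : Int :=
  let messages := PySem.Dict.getD (PySem.Dict.mk conversation) "messages" []
  (PySem.List.pyRange 1 messages.length 1).foldl
    (fun count i =>
      if pvIsAssistant (PySem.List.pyGetD messages i []) &&
         pvIsAssistant (PySem.List.pyGetD messages (i - 1) []) then count + 1 else count)
    0

-- ===== PORT B =====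
def unsolicited_followup_count_alt (conversation : List (String × List (List (String × String)))) : Int :=
  let messages := PySem.Dict.getD (PySem.Dict.mk conversation) "messages" []
  let st := messages.foldl
    (fun (tr : Int × Int) m =>
      if pvIsAssistant m then (tr.1, tr.2 + 1) else (tr.1 + max (tr.2 - 1) 0, 0))
    (0, 0)
  st.1 + max (st.2 - 1) 0

-- ===== PRECONDITION & SPEC =====
def Spec_unsolicited_followup_count (conversation : List (String × List (List (String × String)))) (out : Int) : Prop := out = unsolicited_followup_count_alt conversation
instance (conversation : List (String × List (List (String × String)))) (out : Int) : Decidable (Spec_unsolicited_followup_count conversation out) := by unfold Spec_unsolicited_followup_count; infer_instance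

-- ===== CLAIM (what is proved, stated in full; the proofs are below) =====
def Claim_equal_unsolicited_followup_count : Prop := ∀ (conversation : List (String × List (List (String × String)))), Dom_unsolicited_followup_count conversation → Spec_unsolicited_followup_count conversation (unsolicited_followup_count conversation)

-- ===== LEMMAS AND PROOFS =====

-- pairwise characterisation (flag = "previous message is assistant")
def pvPairs (b : Bool) : List (List (String × String)) → Int
  | [] => 0
  | m :: t => (if b && pvIsAssistant m then 1 else 0) + pvPairs (pvIsAssistant m) t

-- run-length characterisation of B's loop
def pvRuns (r : Int) : List (List (String × String)) → Int
  | [] => max (r - 1) 0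
  | m :: t => if pvIsAssistant m then pvRuns (r + 1) t else max (r - 1) 0 + pvRuns 0 t

def pvLastA (b : Bool) : List (List (String × String)) → Bool
  | [] => b
  | m :: t => pvLastA (pvIsAssistant m) t

theorem pvPairs_append (xs : List (List (String × String))) (b : Bool) (x : List (String × String)) :
    pvPairs b (xs ++ [x]) = pvPairs b xs + (if pvLastA b xs && pvIsAssistant x then 1 else 0) := by
  induction xs generalizing b with
  | nil => simp [pvPairs, pvLastA]
  | cons m t ih => simp [pvPairs, pvLastA, ih, add_assoc]

theorem pvLastA_getLast (xs : List (List (String × String))) (b : Bool) (h : xs ≠ []) :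
    pvLastA b xs = pvIsAssistant (xs.getLast h) := by
  induction xs generalizing b with
  | nil => exact absurd rfl h
  | cons m t ih =>
    cases t with
    | nil => simp [pvLastA]
    | cons m' t' => simpa [pvLastA, List.getLast] using ih (pvIsAssistant m) (by simp)

-- A's indexed fold over range(1, n) counts pvPairs on the first k elements
theorem pvA_fold (xs : List (List (String × String))) (k : Nat) (hk : k ≤ xs.length) :
    (PySem.List.pyRange 1 k 1).foldl
      (fun count i =>
        if pvIsAssistant (PySem.List.pyGetD xs i []) &&
           pvIsAssistant (PySem.List.pyGetD xs (i - 1) []) then count + 1 else count)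
      0 = pvPairs false (xs.take k) := by
  induction k with
  | zero => simp [PySem.List.pyRange_one_eq_nil, pvPairs]
  | succ k ih =>
    rcases Nat.eq_zero_or_pos k with hk0 | hk0
    · subst hk0
      simp [PySem.List.pyRange_one_eq_nil (by norm_num : (1 : Int) ≤ 1), List.take_add_one, List.take_zero]
      cases xs with
      | nil => simp at hk
      | cons a t => simp [pvPairs]
    · have hsplit : PySem.List.pyRange 1 ((k:Int) + 1) 1
          = PySem.List.pyRange 1 k 1 ++ [(k : Int)] :=
        PySem.List.pyRange_one_succ_right (by exact_mod_cast hk0)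
      have hcast : ((k + 1 : Nat) : Int) = (k : Int) + 1 := by push_cast; ring
      rw [show ((k + 1 : Nat) : Int) = (k : Int) + 1 from hcast, hsplit, List.foldl_append,
        ih (Nat.le_of_succ_le hk)]
      have hklt : k < xs.length := hk
      have htake : xs.take (k + 1) = xs.take k ++ [xs[k]] := by
        rw [List.take_add_one]; simp [List.getElem?_eq_getElem hklt]
      rw [htake, pvPairs_append]
      have hget1 : PySem.List.pyGetD xs ((k : Int)) ([] : List (String × String)) = xs[k] := by
        rw [PySem.List.pyGetD_natCast]; simp [List.getD, List.getElem?_eq_getElem hklt]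
      have hkm1 : k - 1 < xs.length := by omega
      have hget2 : PySem.List.pyGetD xs ((k : Int) - 1) ([] : List (String × String))
          = xs[k - 1]'hkm1 := by
        have hc : (k : Int) - 1 = ((k - 1 : Nat) : Int) := by omega
        rw [hc, PySem.List.pyGetD_natCast]
        simp [List.getD, List.getElem?_eq_getElem hkm1]
      have hlast : pvLastA false (xs.take k)
          = pvIsAssistant (xs[k - 1]'hkm1) := by
        have hlen : (xs.take k).length = k := by simp; omega
        have hne : xs.take k ≠ [] := by
          intro hc; rw [hc] at hlen; simp at hlen; omega
        rw [pvLastA_getLast _ _ hne]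
        congr 1
        rw [List.getLast_eq_getElem]
        simp only [List.getElem_take, hlen]
      simp only [List.foldl_cons, List.foldl_nil, hget1, hget2, hlast]
      rcases h1 : pvIsAssistant (xs[k - 1]'hkm1) <;>
        rcases h2 : pvIsAssistant xs[k] <;> simp [h2]

-- B's fold in terms of pvRuns
theorem pvB_fold (xs : List (List (String × String))) (t r : Int) :
    (let st := xs.foldl
        (fun (tr : Int × Int) m =>
          if pvIsAssistant m then (tr.1, tr.2 + 1) else (tr.1 + max (tr.2 - 1) 0, 0))
        (t, r)
     st.1 + max (st.2 - 1) 0) = t + pvRuns r xs := by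
  induction xs generalizing t r with
  | nil => simp [pvRuns]
  | cons m l ih =>
    by_cases h : pvIsAssistant m
    · simp only [List.foldl_cons, h, if_pos, pvRuns]; simpa using ih t (r + 1)
    · simp only [List.foldl_cons, h, pvRuns, Bool.false_eq_true]
      simpa [add_assoc] using ih (t + max (r - 1) 0) 0

-- pvRuns = pvPairs : combined induction with generalized run length
theorem pvRuns_eq_pvPairs (xs : List (List (String × String))) :
    (pvRuns 0 xs = pvPairs false xs) ∧
    (∀ r : Int, 1 ≤ r → pvRuns r xs = (r - 1) + pvPairs true xs) := by
  induction xs with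
  | nil =>
    refine ⟨by simp [pvRuns, pvPairs], fun r hr => by simp [pvRuns, pvPairs]; omega⟩
  | cons m t ih =>
    obtain ⟨ih0, ih1⟩ := ih
    by_cases h : pvIsAssistant m
    · constructor
      · simp only [pvRuns, pvPairs, h, if_pos]
        rw [show (0 : Int) + 1 = 1 by norm_num, ih1 1 (by norm_num)]; simp
      · intro r hr
        simp only [pvRuns, pvPairs, h, if_pos]
        rw [ih1 (r + 1) (by omega)]; simp; ring
    · constructor
      · simp only [pvRuns, pvPairs, h, Bool.false_eq_true]
        simp [ih0]
      · intro r hr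
        simp only [pvRuns, pvPairs, h, Bool.false_eq_true]
        rw [ih0]; simp; omega

-- ===== VERDICT (by name: the statement is the Claim_ definition above) =====
theorem unsolicited_followup_count_spec : Claim_equal_unsolicited_followup_count := by
  intro conversation _
  unfold Spec_unsolicited_followup_count unsolicited_followup_count unsolicited_followup_count_alt
  set xs := PySem.Dict.getD (PySem.Dict.mk conversation) "messages" [] with hxs
  have hA := pvA_fold xs xs.length (le_refl _)
  have hB := pvB_fold xs 0 0
  simp only [List.take_length] at hA
  simp only [zero_add] at hB
  simp only [hA, hB, (pvRuns_eq_pvPairs xs).1]
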